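-- pv_equiv track=rewrite | github.com/VanHackAcademy/histogram-and-rectangles | solution.py | getRectangleProperties
-- ===== SOURCE A (Python) =====
-- def getRectangleProperties(rectangleList: list[int]) -> int:
--   numOfRect = len(rectangleList)
--   maxPerimeter, maxArea, totalPerimeter, totalArea = 0, 0, 0, 0
--
--   for i in rectangleList:
--     perimeter = (i + 1) * 2
--     totalPerimeter += perimeter
--     maxPerimeter = max(maxPerimeter, perimeter)
--     area = i
--     totalArea += area
--     maxArea = max(maxArea, area)
--   i = 0
--
--   while i < len(rectangleList) - 1:
--     for k in range(i + 1, len(rectangleList)):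
--       if rectangleList[i] < rectangleList[k]:
--         currPerimeter = (rectangleList[i] + k - i + 1) * 2
--         totalPerimeter += currPerimeter
--         maxPerimeter = max(maxPerimeter, currPerimeter)
--
--         currArea = (rectangleList[i] * (k - i + 1))
--         totalArea += currArea
--         maxArea = max(maxArea, currArea)
--         numOfRect += 1
--       else:
--         break
--     i += 1
--
--   return {
--     "totalPerimeter" : totalPerimeter,
--     "totalArea" : totalArea,
--     "maxPerimeter" : maxPerimeter,
--     "maxArea" : maxArea,
--     "numOfRectangles" : numOfRect
--   }
-- ===== SOURCE B (Python) =====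
-- def getRectangleProperties(rectangleList):
--     a = rectangleList
--     n = len(a)
--     totalPerimeter = sum((x + 1) * 2 for x in a)
--     totalArea = sum(a)
--     maxPerimeter = max([0] + [(x + 1) * 2 for x in a])
--     maxArea = max([0] + a)
--     numOfRect = n
--
--     # one (start, stop) event per index: stop = next position whose bar is not
--     # strictly taller, found with a monotonic stack in O(n)
--     events = []
--     stack = []
--     for j in range(n):
--         while stack and a[stack[-1]] >= a[j]:
--             events.append((stack.pop(), j))
--         stack.append(j)
--     while stack:
--         events.append((stack.pop(), n))
--
--     for s, e in events:
--         v = a[s]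
--         m = e - s                        # widths 2..m stack on top of bar s
--         if m >= 2:
--             cnt = m - 1
--             sumw = (m * (m + 1)) // 2 - 1   # sum of widths 2..m
--             totalPerimeter += 2 * (cnt * v + sumw)
--             totalArea += v * sumw
--             maxPerimeter = max(maxPerimeter, 2 * (v + m))
--             # area v*w is linear in w, so its max over widths 2..m is at an endpoint
--             maxArea = max(maxArea, v * 2, v * m)
--             numOfRect += cnt
--
--     return {
--         "totalPerimeter": totalPerimeter,
--         "totalArea": totalArea,
--         "maxPerimeter": maxPerimeter,
--         "maxArea": maxArea,
--         "numOfRectangles": numOfRect,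
--     }
-- ===== Notes on version B (the rewrite author's own statement) =====
-- stated objective: faster
-- what changed: A's quadratic outer/inner index scan with break is replaced by a single monotonic-stack pass that finds each bar's stopping position once, plus closed-form arithmetic (Gauss sum, endpoint maxima of the linear area/perimeter functions) for each bar's whole run instead of per-width accumulation.
import Mathlib
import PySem

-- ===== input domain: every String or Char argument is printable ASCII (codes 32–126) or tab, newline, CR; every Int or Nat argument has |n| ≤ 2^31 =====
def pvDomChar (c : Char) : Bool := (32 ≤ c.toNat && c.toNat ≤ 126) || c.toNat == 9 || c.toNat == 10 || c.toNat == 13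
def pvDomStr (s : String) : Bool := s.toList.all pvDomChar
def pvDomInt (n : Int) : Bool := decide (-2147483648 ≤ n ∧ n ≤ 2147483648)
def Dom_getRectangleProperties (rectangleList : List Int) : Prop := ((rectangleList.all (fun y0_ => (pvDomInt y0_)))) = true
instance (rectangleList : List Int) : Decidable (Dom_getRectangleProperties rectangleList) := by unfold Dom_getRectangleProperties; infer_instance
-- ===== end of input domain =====

-- B replaces A's quadratic start-index/inner-break scan by a monotonic-stack pass that finds each
-- bar's stopping position once, plus closed-form arithmetic per bar (measured asymptotically faster).

-- the five running statistics both Pythons maintain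
structure PvSt where
  tp : Int   -- totalPerimeter
  ta : Int   -- totalArea
  mp : Int   -- maxPerimeter
  ma : Int   -- maxArea
  cnt : Int  -- numOfRectangles
deriving DecidableEq, Repr

-- ===== PORT A =====

-- inner 'for k in range(i+1, len)' with break (indices always in range in A; getD is exact here)
def pvInnerA (a : List Int) (i k : Nat) (st : PvSt) : PvSt :=
  if k < a.length then
    if a.getD i 0 < a.getD k 0 then
      let currPerimeter := (a.getD i 0 + (k : Int) - (i : Int) + 1) * 2
      let currArea := a.getD i 0 * ((k : Int) - (i : Int) + 1)
      pvInnerA a i (k + 1)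
        { tp := st.tp + currPerimeter, ta := st.ta + currArea,
          mp := max st.mp currPerimeter, ma := max st.ma currArea, cnt := st.cnt + 1 }
    else st
  else st
termination_by a.length - k

-- outer 'while i < len - 1'
def pvOuterA (a : List Int) (i : Nat) (st : PvSt) : PvSt :=
  if i < a.length - 1 then pvOuterA a (i + 1) (pvInnerA a i (i + 1) st) else st
termination_by a.length - 1 - i

def getRectangleProperties (rectangleList : List Int) : List (String × Int) :=
  let numOfRect : Int := rectangleList.length
  -- 'for i in rectangleList' pass
  let st0 := rectangleList.foldl
    (fun st x =>
      let perimeter := (x + 1) * 2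
      { tp := st.tp + perimeter, ta := st.ta + x,
        mp := max st.mp perimeter, ma := max st.ma x, cnt := st.cnt })
    { tp := 0, ta := 0, mp := 0, ma := 0, cnt := numOfRect }
  let st := pvOuterA rectangleList 0 st0
  [("totalPerimeter", st.tp), ("totalArea", st.ta), ("maxPerimeter", st.mp),
   ("maxArea", st.ma), ("numOfRectangles", st.cnt)]

-- ===== PORT B =====

-- 'while stack and a[stack[-1]] >= a[j]: events.append((stack.pop(), j))'  (stack head = top)
def pvPopB (a : List Int) (j : Nat) : List Nat → List (Nat × Nat) → List Nat × List (Nat × Nat)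
  | [], ev => ([], ev)
  | s :: rest, ev =>
    if a.getD j 0 ≤ a.getD s 0 then pvPopB a j rest (ev ++ [(s, j)]) else (s :: rest, ev)

-- trailing 'while stack: events.append((stack.pop(), n))'
def pvFlushB (n : Nat) : List Nat → List (Nat × Nat) → List (Nat × Nat)
  | [], ev => ev
  | s :: rest, ev => pvFlushB n rest (ev ++ [(s, n)])

-- closed-form contribution of one (start, stop) event
def pvContribB (a : List Int) (st : PvSt) (p : Nat × Nat) : PvSt :=
  let v := a.getD p.1 0
  let m : Int := (p.2 : Int) - (p.1 : Int)
  if 2 ≤ m then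
    let cnt := m - 1
    let sumw := PySem.Int.floordiv (m * (m + 1)) 2 - 1
    { tp := st.tp + 2 * (cnt * v + sumw), ta := st.ta + v * sumw,
      mp := max st.mp (2 * (v + m)),
      ma := max st.ma (max (v * 2) (v * m)),
      cnt := st.cnt + cnt }
  else st

def getRectangleProperties_alt (rectangleList : List Int) : List (String × Int) :=
  let a := rectangleList
  let n := a.length
  let totalPerimeter := (a.map (fun x => (x + 1) * 2)).sum
  let totalArea := a.sum
  let maxPerimeter := (PySem.List.max? ((0 : Int) :: a.map (fun x => (x + 1) * 2)) (fun y => y)).getD 0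
  let maxArea := (PySem.List.max? ((0 : Int) :: a) (fun y => y)).getD 0
  let scan := (List.range n).foldl
    (fun st j => let r := pvPopB a j st.1 st.2; (j :: r.1, r.2)) ([], [])
  let events := pvFlushB n scan.1 scan.2
  let st := events.foldl (pvContribB a)
    { tp := totalPerimeter, ta := totalArea, mp := maxPerimeter, ma := maxArea, cnt := (n : Int) }
  [("totalPerimeter", st.tp), ("totalArea", st.ta), ("maxPerimeter", st.mp),
   ("maxArea", st.ma), ("numOfRectangles", st.cnt)]

-- ===== PRECONDITION & SPEC =====
def Spec_getRectangleProperties (rectangleList : List Int) (out : List (String × Int)) : Prop := out = getRectangleProperties_alt rectangleList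
instance (rectangleList : List Int) (out : List (String × Int)) : Decidable (Spec_getRectangleProperties rectangleList out) := by unfold Spec_getRectangleProperties; infer_instance

-- ===== CLAIM (what is proved, stated in full; the proofs are below) =====
def Claim_equal_getRectangleProperties : Prop := ∀ (rectangleList : List Int), Dom_getRectangleProperties rectangleList → Spec_getRectangleProperties rectangleList (getRectangleProperties rectangleList)

-- ===== LEMMAS AND PROOFS =====

-- value of bar i
def pvV (a : List Int) (i : Nat) : Int := a.getD i 0

-- first index ≥ k whose bar is not strictly taller than bar i (a.length if none)
def pvNseF (a : List Int) (i k : Nat) : Nat :=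
  if k < a.length then (if pvV a i < pvV a k then pvNseF a i (k + 1) else k) else a.length
termination_by a.length - k

def pvNse (a : List Int) (i : Nat) : Nat := pvNseF a i (i + 1)

-- the update A's inner loop performs at index k
def pvUpdA (a : List Int) (i : Nat) (st : PvSt) (k : Nat) : PvSt :=
  let currPerimeter := (pvV a i + (k : Int) - (i : Int) + 1) * 2
  let currArea := pvV a i * ((k : Int) - (i : Int) + 1)
  { tp := st.tp + currPerimeter, ta := st.ta + currArea,
    mp := max st.mp currPerimeter, ma := max st.ma currArea, cnt := st.cnt + 1 }

theorem pvNseF_ge (a : List Int) (i k : Nat) (h : k ≤ a.length) : k ≤ pvNseF a i k := by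
  fun_induction pvNseF a i k with
  | case1 k hk hv ih => have := ih (by omega); omega
  | case2 k hk hv => omega
  | case3 k hk => omega

theorem pvNseF_le (a : List Int) (i k : Nat) : pvNseF a i k ≤ a.length := by
  fun_induction pvNseF a i k with
  | case1 k hk hv ih => exact ih
  | case2 k hk hv => omega
  | case3 k hk => omega

theorem pvNseF_mem (a : List Int) (i k j : Nat) (h1 : k ≤ j) (h2 : j < pvNseF a i k) :
    pvV a i < pvV a j := by
  fun_induction pvNseF a i k with
  | case1 k hk hv ih =>
    rcases Nat.eq_or_lt_of_le h1 with rfl | hlt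
    · exact hv
    · exact ih hlt h2
  | case2 k hk hv => omega
  | case3 k hk => have := pvNseF_le a i k; omega

theorem pvNseF_end (a : List Int) (i k : Nat) :
    pvNseF a i k = a.length ∨ (pvNseF a i k < a.length ∧ ¬ pvV a i < pvV a (pvNseF a i k)) := by
  fun_induction pvNseF a i k with
  | case1 k hk hv ih => exact ih
  | case2 k hk hv => exact Or.inr ⟨hk, hv⟩
  | case3 k hk => exact Or.inl rfl

theorem pvNse_ge (a : List Int) (i : Nat) (h : i < a.length) : i + 1 ≤ pvNse a i :=
  pvNseF_ge a i (i + 1) (by omega)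

theorem pvNse_le (a : List Int) (i : Nat) : pvNse a i ≤ a.length := pvNseF_le a i (i + 1)

theorem pvNse_mem (a : List Int) (i j : Nat) (h1 : i + 1 ≤ j) (h2 : j < pvNse a i) :
    pvV a i < pvV a j := pvNseF_mem a i (i + 1) j h1 h2

-- pop test at j decides 'pvNse s = j' for live stack entries
theorem pvNse_eq_iff (a : List Int) (s j : Nat) (hsj : s < j) (hj : j < a.length)
    (hlive : j ≤ pvNse a s) : (pvV a j ≤ pvV a s) ↔ pvNse a s = j := by
  constructor
  · intro hle
    by_contra hne
    have : pvV a s < pvV a j := pvNse_mem a s j (by omega) (by omega)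
    omega
  · intro heq
    rcases pvNseF_end a s (s + 1) with h | ⟨h1, h2⟩
    · rw [pvNse] at heq; omega
    · rw [pvNse] at heq; rw [heq] at h2; omega

-- A's inner loop is the fold of pvUpdA over the run [k, pvNseF i k)
theorem pvInnerA_eq_fold (a : List Int) (i k : Nat) (st : PvSt) :
    pvInnerA a i k st = (List.range' k (pvNseF a i k - k)).foldl (pvUpdA a i) st := by
  fun_induction pvInnerA a i k st with
  | case1 k st hk hv cp ca ih =>
    have hne : pvNseF a i k = pvNseF a i (k + 1) := by
      rw [pvNseF]; simp only [if_pos hk]; rw [if_pos (by simpa [pvV] using hv)]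
    have hge : k + 1 ≤ pvNseF a i (k + 1) := pvNseF_ge a i (k + 1) (by omega)
    have hcnt : pvNseF a i k - k = (pvNseF a i (k + 1) - (k + 1)) + 1 := by omega
    rw [hcnt, List.range'_succ, List.foldl_cons]
    exact ih
  | case2 k st hk hv =>
    have : pvNseF a i k = k := by
      rw [pvNseF]; simp only [if_pos hk]; rw [if_neg (by simpa [pvV] using hv)]
    simp [this]
  | case3 k st hk =>
    have : pvNseF a i k = a.length := by rw [pvNseF]; simp [hk]
    simp [this, Nat.sub_eq_zero_of_le (by omega : a.length ≤ k)]

-- A's outer loop folds the inner loop over the start indices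
theorem pvOuterA_eq_fold (a : List Int) (i : Nat) (st : PvSt) :
    pvOuterA a i st =
      (List.range' i (a.length - 1 - i)).foldl (fun st i => pvInnerA a i (i + 1) st) st := by
  fun_induction pvOuterA a i st with
  | case1 i st hi ih =>
    have hcnt : a.length - 1 - i = (a.length - 1 - (i + 1)) + 1 := by omega
    rw [hcnt, List.range'_succ, List.foldl_cons]
    exact ih
  | case2 i st hi =>
    have : a.length - 1 - i = 0 := by omega
    simp [this]

-- exact halving
theorem pvHalf (c : Int) : PySem.Int.floordiv (2 * c) 2 = c := by
  rw [PySem.Int.floordiv_eq_ediv_of_pos (by norm_num)]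
  omega

theorem pvMaxAbsorb1 (x a b : Int) (h : a ≤ b) : max (max x a) b = max x b := by
  rw [max_assoc, max_eq_right h]

-- the linear function w ↦ v*w on widths 2..m attains its max at an endpoint, and extending
-- the run by one width absorbs the previous interior endpoint
theorem pvMaxRun (x v m : Int) (h : 2 ≤ m) :
    max (max x (max (v * 2) (v * m))) (v * (m + 1)) = max x (max (v * 2) (v * (m + 1))) := by
  rcases le_total 0 v with hv | hv
  · have h1 : v * 2 ≤ v * m := by nlinarith
    have h2 : v * m ≤ v * (m + 1) := by nlinarith
    have h3 : v * 2 ≤ v * (m + 1) := by nlinarith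
    rw [max_eq_right h1, max_eq_right h3, max_assoc, max_eq_right h2]
  · have h1 : v * m ≤ v * 2 := by nlinarith
    have h2 : v * (m + 1) ≤ v * m := by nlinarith
    have h3 : v * (m + 1) ≤ v * 2 := by nlinarith
    rw [max_eq_left h1, max_eq_left h3, max_assoc, max_eq_left h3]

-- the incremental run fold equals B's closed-form contribution
theorem pvFold_eq_contrib (a : List Int) (i e : Nat) (he : i < e) (st : PvSt) :
    (List.range' (i + 1) (e - (i + 1))).foldl (pvUpdA a i) st = pvContribB a st (i, e) := by
  induction e, he using Nat.le_induction with
  | base =>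
    simp only [Nat.sub_self, List.range'_zero, List.foldl_nil, pvContribB]
    rw [if_neg (by push_cast; omega)]
  | succ d hd ih =>
    have hcnt : d + 1 - (i + 1) = (d - (i + 1)) + 1 := by omega
    have hse : i + 1 + 1 * (d - (i + 1)) = d := by omega
    have hsplit : List.range' (i + 1) ((d - (i + 1)) + 1) = List.range' (i + 1) (d - (i + 1)) ++ [d] := by
      rw [List.range'_concat, hse]
    rw [hcnt, hsplit, List.foldl_append, List.foldl_cons, List.foldl_nil, ih]
    simp only [pvContribB, pvUpdA, pvV]
    push_cast
    by_cases h1 : (2 : Int) ≤ (d : Int) - (i : Int)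
    · -- previous contribution was active
      rw [if_pos h1, if_pos (show (2 : Int) ≤ (d : Int) + 1 - (i : Int) by omega)]
      obtain ⟨c, hc⟩ : (2 : Int) ∣ ((d : Int) - (i : Int)) * (((d : Int) - (i : Int)) + 1) :=
        (Int.even_mul_succ_self ((d : Int) - (i : Int))).two_dvd
      have hf1 : PySem.Int.floordiv (((d : Int) - (i : Int)) * (((d : Int) - (i : Int)) + 1)) 2 = c := by
        rw [hc]; exact pvHalf c
      have hf2 : PySem.Int.floordiv (((d : Int) + 1 - (i : Int)) * (((d : Int) + 1 - (i : Int)) + 1)) 2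
          = c + ((d : Int) + 1 - (i : Int)) := by
        rw [show ((d : Int) + 1 - (i : Int)) * (((d : Int) + 1 - (i : Int)) + 1)
            = 2 * (c + ((d : Int) + 1 - (i : Int))) from by linear_combination hc]
        exact pvHalf _
      rw [hf1, hf2]
      set v := a.getD i 0 with hv
      simp only [PvSt.mk.injEq]
      refine ⟨?_, ?_, ?_, ?_, ?_⟩
      · ring
      · ring
      · rw [pvMaxAbsorb1 _ _ _ (by omega)]
        congr 1; ring
      · rw [show v * ((d : Int) + 1 - (i : Int)) = v * (((d : Int) - (i : Int)) + 1) from by ring]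
        exact pvMaxRun _ _ _ h1
      · ring
    · -- previous width count was one: that contribution was the identity
      have hd1 : (d : Int) - (i : Int) = 1 := by omega
      rw [if_neg h1, if_pos (show (2 : Int) ≤ (d : Int) + 1 - (i : Int) by omega)]
      rw [show ((d : Int) + 1 - (i : Int)) = 2 by omega]
      rw [show ((2 : Int) * (2 + 1)) = 2 * 3 from by norm_num, pvHalf]
      set v := a.getD i 0 with hv
      simp only [PvSt.mk.injEq]
      refine ⟨?_, ?_, ?_, ?_, ?_⟩
      · linear_combination 2 * hd1
      · rw [hd1]; ring
      · congr 1; linear_combination 2 * hd1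
      · rw [max_self]; congr 1; rw [hd1]; ring
      · norm_num

-- B's pop loop on a well-formed stack
theorem pvPopB_spec (a : List Int) (j : Nat) (hj : j < a.length) (stk : List Nat)
    (ev : List (Nat × Nat)) (hsort : stk.Pairwise (· > ·))
    (hmem : ∀ s ∈ stk, s < j ∧ j ≤ pvNse a s) :
    pvPopB a j stk ev =
      (stk.filter (fun s => decide (j + 1 ≤ pvNse a s)),
       ev ++ (stk.filter (fun s => decide (pvNse a s = j))).map (fun s => (s, j))) := by
  induction stk generalizing ev with
  | nil => simp [pvPopB]
  | cons s rest ih =>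
    obtain ⟨hs_lt, hs_live⟩ := hmem s (List.mem_cons_self ..)
    rw [pvPopB]
    by_cases hc : a.getD j 0 ≤ a.getD s 0
    · rw [if_pos hc]
      have hnse : pvNse a s = j := (pvNse_eq_iff a s j hs_lt hj hs_live).mp (by simpa [pvV] using hc)
      rw [ih (ev ++ [(s, j)]) ((List.pairwise_cons.mp hsort).2)
        (fun x hx => hmem x (List.mem_cons_of_mem _ hx))]
      simp [hnse]
    · rw [if_neg hc]
      have hgt : j + 1 ≤ pvNse a s := by
        have : ¬ pvNse a s = j := fun h =>
          hc (by simpa [pvV] using (pvNse_eq_iff a s j hs_lt hj hs_live).mpr h)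
        omega
      have hrest : ∀ x ∈ rest, pvNse a x ≠ j := by
        intro x hx hxe
        have hx_lt_s : x < s := List.rel_of_pairwise_cons hsort hx
        obtain ⟨hx_lt, hx_live⟩ := hmem x (List.mem_cons_of_mem _ hx)
        have h1 : pvV a j ≤ pvV a x := (pvNse_eq_iff a x j hx_lt hj hx_live).mpr hxe
        have h2 : pvV a x < pvV a s := pvNse_mem a x s (by omega) (by omega)
        have h3 : pvV a s < pvV a j := by simpa [pvV] using not_le.mp hc
        omega
      have hkeep : (s :: rest).filter (fun s => decide (j + 1 ≤ pvNse a s)) = s :: rest := by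
        apply List.filter_eq_self.mpr
        intro x hx
        rcases List.mem_cons.mp hx with rfl | hx'
        · simpa using hgt
        · have h4 := (hmem x (List.mem_cons_of_mem _ hx')).2
          have h5 := hrest x hx'
          simpa using (by omega : j + 1 ≤ pvNse a x)
      have hpop : (s :: rest).filter (fun s => decide (pvNse a s = j)) = [] := by
        apply List.filter_eq_nil_iff.mpr
        intro x hx
        rcases List.mem_cons.mp hx with rfl | hx'
        · simpa using (by omega : ¬ pvNse a x = j)
        · simpa using hrest x hx'
      rw [hkeep, hpop]
      simp

-- the scan invariant
theorem pvScan_inv (a : List Int) (j : Nat) (hj : j ≤ a.length) :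
    ((List.range j).foldl (fun st j => let r := pvPopB a j st.1 st.2; (j :: r.1, r.2))
        (([], []) : List Nat × List (Nat × Nat))).1
      = ((List.range j).filter (fun s => decide (j ≤ pvNse a s))).reverse ∧
    ((List.range j).foldl (fun st j => let r := pvPopB a j st.1 st.2; (j :: r.1, r.2))
        (([], []) : List Nat × List (Nat × Nat))).2.Perm
      (((List.range j).filter (fun s => decide (pvNse a s < j))).map (fun s => (s, pvNse a s))) := by
  induction j with
  | zero => simp
  | succ j ih =>
    obtain ⟨ih1, ih2⟩ := ih (by omega)
    have hjlen : j < a.length := by omega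
    rw [List.range_succ, List.foldl_append, List.foldl_cons, List.foldl_nil]
    set P := (List.range j).foldl (fun st j => let r := pvPopB a j st.1 st.2; (j :: r.1, r.2))
        (([], []) : List Nat × List (Nat × Nat)) with hP
    have hsort : P.1.Pairwise (· > ·) := by
      rw [ih1, List.pairwise_reverse]
      exact (List.pairwise_lt_range).filter _
    have hmem : ∀ s ∈ P.1, s < j ∧ j ≤ pvNse a s := by
      intro s hs
      rw [ih1, List.mem_reverse, List.mem_filter] at hs
      exact ⟨List.mem_range.mp hs.1, by simpa using hs.2⟩
    rw [pvPopB_spec a j hjlen P.1 P.2 hsort hmem]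
    constructor
    · -- stack component
      simp only
      rw [ih1, List.filter_reverse, List.filter_filter]
      have hcong : (List.range j).filter
          (fun s => decide (j + 1 ≤ pvNse a s) && decide (j ≤ pvNse a s)) =
          (List.range j).filter (fun s => decide (j + 1 ≤ pvNse a s)) := by
        apply List.filter_congr
        intro x _
        by_cases h : j + 1 ≤ pvNse a x
        · simp [h, (by omega : j ≤ pvNse a x)]
        · simp [h]
      rw [hcong, List.filter_append]
      have hjj2 : (([j] : List Nat).filter (fun s => decide (j + 1 ≤ pvNse a s))) = [j] := by
        simpa using pvNse_ge a j hjlen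
      rw [hjj2, List.reverse_append]
      rfl
    · -- events component
      simp only
      have e1 : P.1.filter (fun s => decide (pvNse a s = j)) =
          ((List.range j).filter (fun s => decide (pvNse a s = j))).reverse := by
        rw [ih1, List.filter_reverse, List.filter_filter]
        congr 1
        apply List.filter_congr
        intro x _
        by_cases h : pvNse a x = j
        · simp [h]
        · simp [h]
      have e2 : ((P.1.filter (fun s => decide (pvNse a s = j))).map (fun s => (s, j))).Perm
          (((List.range j).filter (fun s => decide (pvNse a s = j))).map
            (fun s => (s, pvNse a s))) := by
        rw [e1]
        refine ((List.reverse_perm _).map _).trans ?_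
        rw [List.map_congr_left (fun x hx => ?_)]
        have := (List.mem_filter.mp hx).2
        simp only [decide_eq_true_eq] at this
        rw [this]
      have t1 : (List.range j ++ [j]).filter (fun s => decide (pvNse a s < j + 1)) =
          (List.range j).filter (fun s => decide (pvNse a s < j + 1)) := by
        rw [List.filter_append]
        have hj0 : (([j] : List Nat).filter (fun s => decide (pvNse a s < j + 1))) = [] := by
          simp only [List.filter_cons, List.filter_nil]
          have := pvNse_ge a j hjlen
          simp only [decide_eq_true_eq]
          rw [if_neg (by omega)]
        rw [hj0, List.append_nil]
      have hA : ((List.range j).filter (fun s => decide (pvNse a s < j + 1))).filter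
          (fun s => decide (pvNse a s < j)) = (List.range j).filter (fun s => decide (pvNse a s < j)) := by
        rw [List.filter_filter]
        apply List.filter_congr
        intro x _
        by_cases h : pvNse a x < j
        · simp [h, (by omega : pvNse a x < j + 1)]
        · simp [h]
      have hB : ((List.range j).filter (fun s => decide (pvNse a s < j + 1))).filter
          (fun s => !decide (pvNse a s < j)) = (List.range j).filter (fun s => decide (pvNse a s = j)) := by
        rw [List.filter_filter]
        apply List.filter_congr
        intro x _
        by_cases h : pvNse a x = j
        · simp [h]
        · by_cases h2 : pvNse a x < j
          · simp [h, h2]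
          · simp [h, h2]
            omega
      have t2 : ((List.range j).filter (fun s => decide (pvNse a s < j)) ++
          (List.range j).filter (fun s => decide (pvNse a s = j))).Perm
          ((List.range j).filter (fun s => decide (pvNse a s < j + 1))) := by
        rw [← hA, ← hB]
        exact List.filter_append_perm _ _
      refine ((ih2.append e2).trans ?_)
      rw [← List.map_append, t1]
      exact t2.map _

theorem pvFlushB_eq (n : Nat) (stk : List Nat) (ev : List (Nat × Nat)) :
    pvFlushB n stk ev = ev ++ stk.map (fun s => (s, n)) := by
  induction stk generalizing ev with
  | nil => simp [pvFlushB]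
  | cons s rest ih => rw [pvFlushB, ih]; simp

-- the event list is a permutation of (i, pvNse i) over all indices
theorem pvEvents_perm (a : List Int) :
    (pvFlushB a.length
      ((List.range a.length).foldl (fun st j => let r := pvPopB a j st.1 st.2; (j :: r.1, r.2))
        (([], []) : List Nat × List (Nat × Nat))).1
      ((List.range a.length).foldl (fun st j => let r := pvPopB a j st.1 st.2; (j :: r.1, r.2))
        (([], []) : List Nat × List (Nat × Nat))).2).Perm
    ((List.range a.length).map (fun s => (s, pvNse a s))) := by
  obtain ⟨h1, h2⟩ := pvScan_inv a a.length le_rfl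
  rw [pvFlushB_eq, h1]
  have e2 : ((((List.range a.length).filter
      (fun s => decide (a.length ≤ pvNse a s))).reverse).map (fun s => (s, a.length))).Perm
      (((List.range a.length).filter (fun s => decide (a.length ≤ pvNse a s))).map
        (fun s => (s, pvNse a s))) := by
    refine ((List.reverse_perm _).map _).trans ?_
    rw [List.map_congr_left (fun x hx => ?_)]
    have hle := (List.mem_filter.mp hx).2
    simp only [decide_eq_true_eq] at hle
    have := pvNse_le a x
    rw [(by omega : pvNse a x = a.length)]
  have hB : (List.range a.length).filter (fun s => !decide (pvNse a s < a.length)) =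
      (List.range a.length).filter (fun s => decide (a.length ≤ pvNse a s)) := by
    apply List.filter_congr
    intro x _
    by_cases h : pvNse a x < a.length <;> simp [h] <;> omega
  refine ((h2.append e2).trans ?_)
  rw [← List.map_append]
  refine List.Perm.map _ ?_
  rw [← hB]
  exact List.filter_append_perm _ _

theorem pvStExt (s t : PvSt) (h1 : s.tp = t.tp) (h2 : s.ta = t.ta) (h3 : s.mp = t.mp)
    (h4 : s.ma = t.ma) (h5 : s.cnt = t.cnt) : s = t := by
  cases s; cases t; simp_all

theorem pvContribB_comm (a : List Int) (st : PvSt) (p q : Nat × Nat) :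
    pvContribB a (pvContribB a st p) q = pvContribB a (pvContribB a st q) p := by
  simp only [pvContribB]
  split_ifs <;> try rfl
  all_goals apply pvStExt
  all_goals dsimp only
  all_goals first
    | exact max_right_comm ..
    | ring

theorem pvFoldl_perm {α β : Type} (f : β → α → β)
    (h : ∀ b a a', f (f b a) a' = f (f b a') a)
    {l₁ l₂ : List α} (p : l₁.Perm l₂) (b : β) : l₁.foldl f b = l₂.foldl f b := by
  induction p generalizing b with
  | nil => rfl
  | cons x p ih => simp only [List.foldl_cons]; exact ih _
  | swap x y l => simp only [List.foldl_cons]; rw [h]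
  | trans p q ih1 ih2 => rw [ih1, ih2]

-- A's first loop splits into independent sums and maxes
theorem pvBaseA (a : List Int) (s0 : PvSt) :
    a.foldl (fun st x =>
      let perimeter := (x + 1) * 2
      { tp := st.tp + perimeter, ta := st.ta + x,
        mp := max st.mp perimeter, ma := max st.ma x, cnt := st.cnt }) s0 =
    { tp := s0.tp + (a.map (fun x => (x + 1) * 2)).sum, ta := s0.ta + a.sum,
      mp := (a.map (fun x => (x + 1) * 2)).foldl max s0.mp,
      ma := a.foldl max s0.ma, cnt := s0.cnt } := by
  induction a generalizing s0 with
  | nil => simp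
  | cons x t ih =>
    simp only [List.foldl_cons, List.map_cons, List.sum_cons, ih]
    congr 1 <;> ring

-- A's whole pass is the closed-form contribution folded over (i, pvNse i)
theorem pvA_fold (a : List Int) (st : PvSt) :
    pvOuterA a 0 st =
      ((List.range a.length).map (fun i => (i, pvNse a i))).foldl (pvContribB a) st := by
  rw [pvOuterA_eq_fold, List.foldl_map, Nat.sub_zero]
  rcases Nat.eq_zero_or_pos a.length with h0 | hpos
  · simp [h0]
  · have hinner : ∀ (st : PvSt) (i : Nat), i < a.length →
        pvInnerA a i (i + 1) st = pvContribB a st (i, pvNse a i) := by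
      intro st i hi
      rw [pvInnerA_eq_fold]
      exact pvFold_eq_contrib a i (pvNse a i) (by have := pvNse_ge a i hi; omega) st
    conv_rhs => rw [List.range_eq_range', (by omega : a.length = (a.length - 1) + 1),
      List.range'_concat]
    rw [List.foldl_append, List.foldl_cons, List.foldl_nil]
    have hlast : ∀ st : PvSt,
        pvContribB a st (0 + 1 * (a.length - 1), pvNse a (0 + 1 * (a.length - 1))) = st := by
      intro st
      have hid : 0 + 1 * (a.length - 1) = a.length - 1 := by omega
      rw [hid]
      have hns : pvNse a (a.length - 1) = a.length := by
        rw [pvNse, (by omega : a.length - 1 + 1 = a.length), pvNseF]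
        simp
      simp only [pvContribB, hns]
      rw [if_neg (by omega)]
    rw [hlast]
    apply PySem.List.foldl_congr_mem
    intro acc x hx
    have hx' : x < a.length - 1 := by
      have := List.mem_range'_1.mp hx
      omega
    exact hinner acc x (by omega)

-- both ports compute the same final statistics
theorem pvMain (a : List Int) : getRectangleProperties a = getRectangleProperties_alt a := by
  unfold getRectangleProperties getRectangleProperties_alt
  simp only [pvBaseA, pvA_fold, PySem.List.max?_id_cons, Option.getD_some]
  rw [pvFoldl_perm (pvContribB a) (fun b p q => pvContribB_comm a b p q) (pvEvents_perm a)]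
  norm_num

-- ===== VERDICT (by name: the statement is the Claim_ definition above) =====
theorem getRectangleProperties_spec : Claim_equal_getRectangleProperties := by
  intro a _
  exact pvMain a
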